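-- pv_equiv track=rewrite | github.com/Eternity714/finance-mcp | src/server/utils/symbol_processor.py | _extract_base_code
-- ===== SOURCE A (Python) =====
-- def _extract_base_code(symbol: str) -> str:
--     """提取基础股票代码，去除所有后缀"""
--     if not symbol:
--         return ""
--
--     # 去除常见后缀
--     suffixes = [
--         ".SH",
--         ".SZ",
--         ".BJ",
--         ".SS",
--         ".XSHE",
--         ".XSHG",  # A股后缀
--         ".HK",
--         ".hk",  # 港股后缀
--         ".US",
--         ".NASDAQ",
--         ".NYSE",
--         ".NMS",  # 美股后缀
--     ]
--
--     clean_symbol = symbol.strip().upper()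
--     for suffix in suffixes:
--         if clean_symbol.endswith(suffix.upper()):
--             clean_symbol = clean_symbol[: -len(suffix)]
--             break
--
--     return clean_symbol
-- ===== SOURCE B (Python) =====
-- _SUFFIXES_BY_LEN = {
--     7: frozenset({".NASDAQ"}),
--     5: frozenset({".XSHE", ".XSHG", ".NYSE"}),
--     4: frozenset({".NMS"}),
--     3: frozenset({".SH", ".SZ", ".BJ", ".SS", ".HK", ".US"}),
-- }
--
--
-- def _extract_base_code(symbol: str) -> str:
--     if not symbol:
--         return ""
--     clean = symbol.strip().upper()
--     for length, suffixes in _SUFFIXES_BY_LEN.items():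
--         if clean[-length:] in suffixes:
--             return clean[:-length]
--     return clean
-- ===== Notes on version B (the rewrite author's own statement) =====
-- stated objective: alternative
-- what changed: Replaces A's ordered scan of 12 endswith tests (stripping via len(suffix)) with a length-grouped table: for each of the four suffix lengths, slice the tail once and look it up in that length's frozenset; correctness relies on no listed suffix being a suffix of another, so order is irrelevant.
import Mathlib
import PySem

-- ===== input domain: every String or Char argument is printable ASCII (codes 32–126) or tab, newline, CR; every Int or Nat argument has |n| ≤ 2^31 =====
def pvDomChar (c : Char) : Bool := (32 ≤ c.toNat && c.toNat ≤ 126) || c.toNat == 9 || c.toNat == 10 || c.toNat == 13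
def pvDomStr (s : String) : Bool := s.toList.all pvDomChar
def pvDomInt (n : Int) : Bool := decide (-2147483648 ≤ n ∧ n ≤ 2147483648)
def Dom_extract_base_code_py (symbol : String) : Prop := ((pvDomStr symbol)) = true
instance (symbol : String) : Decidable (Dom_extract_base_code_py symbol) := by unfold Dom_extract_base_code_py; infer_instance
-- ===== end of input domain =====

-- B replaces A's ordered per-suffix endswith scan by four length-grouped slice-and-set-membership checks
-- (one slice of the tail per length, looked up in a set); same return value everywhere.

-- ===== PORT A =====
-- the for-suffix loop with break: first matching suffix is stripped
def pvStripFirst (clean : String) : List String → String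
  | [] => clean
  | s :: rest =>
      if PySem.Str.endswith clean (PySem.Str.upper s) then
        PySem.Str.slice clean none (some (-(PySem.Str.len s)))
      else pvStripFirst clean rest

def extract_base_code_py (symbol : String) : String :=
  if symbol = "" then ""
  else
    pvStripFirst (PySem.Str.upper (PySem.Str.strip symbol))
      [".SH", ".SZ", ".BJ", ".SS", ".XSHE", ".XSHG", ".HK", ".hk", ".US", ".NASDAQ", ".NYSE", ".NMS"]

-- ===== PORT B =====
-- loop over _SUFFIXES_BY_LEN.items(): slice the last `length` chars once and look them up in that length's set
def pvStripByLen (clean : String) : List (Int × List String) → String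
  | [] => clean
  | (L, sufs) :: rest =>
      if PySem.Str.slice clean (some (-L)) none ∈ sufs then
        PySem.Str.slice clean none (some (-L))
      else pvStripByLen clean rest

def extract_base_code_py_alt (symbol : String) : String :=
  if symbol = "" then ""
  else
    pvStripByLen (PySem.Str.upper (PySem.Str.strip symbol))
      [(7, [".NASDAQ"]), (5, [".XSHE", ".XSHG", ".NYSE"]), (4, [".NMS"]),
       (3, [".SH", ".SZ", ".BJ", ".SS", ".HK", ".US"])]

-- ===== PRECONDITION & SPEC =====
def Spec_extract_base_code_py (symbol : String) (out : String) : Prop := out = extract_base_code_py_alt symbol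
instance (symbol : String) (out : String) : Decidable (Spec_extract_base_code_py symbol out) := by unfold Spec_extract_base_code_py; infer_instance

-- ===== CLAIM (what is proved, stated in full; the proofs are below) =====
def Claim_equal_extract_base_code_py : Prop := ∀ (symbol : String), Dom_extract_base_code_py symbol → Spec_extract_base_code_py symbol (extract_base_code_py symbol)

-- ===== LEMMAS AND PROOFS =====

lemma pvClampIdx_neg (n m : Nat) (hm : 0 < m) :
    PySem.List.clampIdx n (-(m : Int)) = n - min m n := by
  simp only [PySem.List.clampIdx]
  split_ifs <;> omega

-- s.endswith(σ) holds iff the last |σ| characters of s are exactly σ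
lemma pvEndswith_slice (clean σ : String) (K : Int) (hσ : (σ.toList.length : Int) = K)
    (hK : 0 < K) :
    (PySem.Str.endswith clean σ = true) ↔ (PySem.Str.slice clean (some (-K)) none = σ) := by
  subst hσ
  rw [PySem.Str.endswith_eq, PySem.Chars.endswith_iff, List.suffix_iff_eq_drop, String.ext_iff]
  simp only [PySem.Str.toList_slice, PySem.Chars.slice_eq_listSlice, PySem.List.slice_some_none]
  rw [pvClampIdx_neg clean.toList.length σ.toList.length (by omega)]
  have h : clean.toList.length - min σ.toList.length clean.toList.length
      = clean.toList.length - σ.toList.length := by omega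
  rw [h]
  exact eq_comm

-- if the last K characters of `clean` are σ, its last J ≤ K characters are the last J of σ
lemma pvLastSlice (clean σ τ : String) (J K : Int) (hJK : 0 < J ∧ J ≤ K)
    (hσ : (σ.toList.length : Int) = K)
    (hτ : PySem.Str.slice σ (some (-J)) none = τ)
    (h : PySem.Str.slice clean (some (-K)) none = σ) :
    PySem.Str.slice clean (some (-J)) none = τ := by
  subst hσ hτ
  rw [String.ext_iff] at h ⊢
  obtain ⟨hJ0, hJK⟩ := hJK
  have hspos : 0 < σ.toList.length := by omega
  have hJ : J = ((J.toNat : Nat) : Int) := (Int.toNat_of_nonneg (le_of_lt hJ0)).symm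
  rw [hJ]
  rw [hJ] at hJK hJ0
  simp only [PySem.Str.toList_slice, PySem.Chars.slice_eq_listSlice,
    PySem.List.slice_some_none] at h ⊢
  rw [pvClampIdx_neg clean.toList.length σ.toList.length hspos] at h
  rw [pvClampIdx_neg clean.toList.length J.toNat (by omega),
    pvClampIdx_neg σ.toList.length J.toNat (by omega)]
  have hlen : σ.toList.length ≤ clean.toList.length := by
    have := congrArg List.length h
    simp only [List.length_drop] at this
    omega
  have hJk : J.toNat ≤ σ.toList.length := by omega
  rw [show clean.toList.length - min σ.toList.length clean.toList.length
      = clean.toList.length - σ.toList.length from by omega] at h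
  rw [show clean.toList.length - min J.toNat clean.toList.length
      = (clean.toList.length - σ.toList.length) + (σ.toList.length - J.toNat) from by omega,
    show σ.toList.length - min J.toNat σ.toList.length
      = σ.toList.length - J.toNat from by omega,
    ← List.drop_drop, h]

lemma pvChains_eq (clean : String) :
    pvStripFirst clean
        [".SH", ".SZ", ".BJ", ".SS", ".XSHE", ".XSHG", ".HK", ".hk", ".US", ".NASDAQ", ".NYSE", ".NMS"]
      = pvStripByLen clean
        [(7, [".NASDAQ"]), (5, [".XSHE", ".XSHG", ".NYSE"]), (4, [".NMS"]),
         (3, [".SH", ".SZ", ".BJ", ".SS", ".HK", ".US"])] := by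
  simp only [pvStripFirst, pvStripByLen, List.mem_cons, List.not_mem_nil, or_false,
    show PySem.Str.upper ".SH" = ".SH" from by decide,
    show PySem.Str.upper ".SZ" = ".SZ" from by decide,
    show PySem.Str.upper ".BJ" = ".BJ" from by decide,
    show PySem.Str.upper ".SS" = ".SS" from by decide,
    show PySem.Str.upper ".XSHE" = ".XSHE" from by decide,
    show PySem.Str.upper ".XSHG" = ".XSHG" from by decide,
    show PySem.Str.upper ".HK" = ".HK" from by decide,
    show PySem.Str.upper ".hk" = ".HK" from by decide,
    show PySem.Str.upper ".US" = ".US" from by decide,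
    show PySem.Str.upper ".NASDAQ" = ".NASDAQ" from by decide,
    show PySem.Str.upper ".NYSE" = ".NYSE" from by decide,
    show PySem.Str.upper ".NMS" = ".NMS" from by decide,
    show PySem.Str.len ".SH" = 3 from by decide,
    show PySem.Str.len ".SZ" = 3 from by decide,
    show PySem.Str.len ".BJ" = 3 from by decide,
    show PySem.Str.len ".SS" = 3 from by decide,
    show PySem.Str.len ".XSHE" = 5 from by decide,
    show PySem.Str.len ".XSHG" = 5 from by decide,
    show PySem.Str.len ".HK" = 3 from by decide,
    show PySem.Str.len ".hk" = 3 from by decide,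
    show PySem.Str.len ".US" = 3 from by decide,
    show PySem.Str.len ".NASDAQ" = 7 from by decide,
    show PySem.Str.len ".NYSE" = 5 from by decide,
    show PySem.Str.len ".NMS" = 4 from by decide,
    pvEndswith_slice clean ".SH" 3 (by decide) (by decide),
    pvEndswith_slice clean ".SZ" 3 (by decide) (by decide),
    pvEndswith_slice clean ".BJ" 3 (by decide) (by decide),
    pvEndswith_slice clean ".SS" 3 (by decide) (by decide),
    pvEndswith_slice clean ".XSHE" 5 (by decide) (by decide),
    pvEndswith_slice clean ".XSHG" 5 (by decide) (by decide),
    pvEndswith_slice clean ".HK" 3 (by decide) (by decide),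
    pvEndswith_slice clean ".US" 3 (by decide) (by decide),
    pvEndswith_slice clean ".NASDAQ" 7 (by decide) (by decide),
    pvEndswith_slice clean ".NYSE" 5 (by decide) (by decide),
    pvEndswith_slice clean ".NMS" 4 (by decide) (by decide)]
  by_cases h7 : PySem.Str.slice clean (some (-7)) none = ".NASDAQ"
  · have h5 := pvLastSlice clean ".NASDAQ" "ASDAQ" 5 7 (by decide) (by decide) (by decide) h7
    have h4 := pvLastSlice clean ".NASDAQ" "SDAQ" 4 7 (by decide) (by decide) (by decide) h7
    have h3 := pvLastSlice clean ".NASDAQ" "DAQ" 3 7 (by decide) (by decide) (by decide) h7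
    simp [h7, h5, h3]
  · by_cases h5a : PySem.Str.slice clean (some (-5)) none = ".XSHE"
    · have h4 := pvLastSlice clean ".XSHE" "XSHE" 4 5 (by decide) (by decide) (by decide) h5a
      have h3 := pvLastSlice clean ".XSHE" "SHE" 3 5 (by decide) (by decide) (by decide) h5a
      simp [h7, h5a, h3]
    · by_cases h5b : PySem.Str.slice clean (some (-5)) none = ".XSHG"
      · have h4 := pvLastSlice clean ".XSHG" "XSHG" 4 5 (by decide) (by decide) (by decide) h5b
        have h3 := pvLastSlice clean ".XSHG" "SHG" 3 5 (by decide) (by decide) (by decide) h5b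
        simp [h7, h5b, h3]
      · by_cases h5c : PySem.Str.slice clean (some (-5)) none = ".NYSE"
        · have h4 := pvLastSlice clean ".NYSE" "NYSE" 4 5 (by decide) (by decide) (by decide) h5c
          have h3 := pvLastSlice clean ".NYSE" "YSE" 3 5 (by decide) (by decide) (by decide) h5c
          simp [h7, h5c, h3]
        · by_cases h4 : PySem.Str.slice clean (some (-4)) none = ".NMS"
          · have h3 := pvLastSlice clean ".NMS" "NMS" 3 4 (by decide) (by decide) (by decide) h4
            simp [h7, h5a, h5b, h5c, h4, h3]
          · by_cases h3a : PySem.Str.slice clean (some (-3)) none = ".SH"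
            · simp [h7, h5a, h5b, h5c, h4, h3a]
            · by_cases h3b : PySem.Str.slice clean (some (-3)) none = ".SZ"
              · simp [h7, h5a, h5b, h5c, h4, h3b]
              · by_cases h3c : PySem.Str.slice clean (some (-3)) none = ".BJ"
                · simp [h7, h5a, h5b, h5c, h4, h3c]
                · by_cases h3d : PySem.Str.slice clean (some (-3)) none = ".SS"
                  · simp [h7, h5a, h5b, h5c, h4, h3d]
                  · by_cases h3e : PySem.Str.slice clean (some (-3)) none = ".HK"
                    · simp [h7, h5a, h5b, h5c, h4, h3e]
                    · by_cases h3f : PySem.Str.slice clean (some (-3)) none = ".US"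
                      · simp [h7, h5a, h5b, h5c, h4, h3f]
                      · simp [h7, h5a, h5b, h5c, h4, h3a, h3b, h3c, h3d, h3e, h3f]

-- ===== VERDICT (by name: the statement is the Claim_ definition above) =====
theorem extract_base_code_py_spec : Claim_equal_extract_base_code_py := by
  intro symbol _
  unfold Spec_extract_base_code_py extract_base_code_py extract_base_code_py_alt
  by_cases h : symbol = ""
  · simp [h]
  · simp only [h, if_false, pvChains_eq]
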